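-- pv_equiv track=rewrite | github.com/ldhrookie/detect-ReDoS | redos.py | count_spencer_nfa_states
-- ===== SOURCE A (Python) =====
-- def count_spencer_nfa_states(regex: str) -> int: #regex 문자열 입력받는다 그안 리터럴 문자개수, 대략적인 NFA수 +1 반환
--     """
--     Q(상태) 개수 count NFA 개수 Q를 세는 함수라는 뜻
--     """
--     position_count = 0
--     valid_chars = set("abcdefghijklmnopqrstuvwxyzABCDEFGHIJKLMNOPQRSTUVWXYZ0123456789") #특수문자는 없네 아무튼 리터럴 문자 집합
--
--     i = 0
--     while i < len(regex):
--         c = regex[i]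
--         if c in valid_chars:
--             # literal character → counts as a position
--             position_count += 1 #c가 리터럴문자면 상태수 늘리기
--         elif c == '\\' and i + 1 < len(regex): #이스케이프문 처리
--             # escaped character → counts as a position
--             position_count += 1
--             i += 1  # skip the escaped character
--         # ignore operators like *, |, (, ) 등 메타문자는 상태를 직접만들진 않으므로 무시함.
--         i += 1 #다음문자로 이동
--
--     return position_count + 1 #일반적으로 NFA에서 종료상태를 하나 더 갖기때문
-- ===== SOURCE B (Python) =====
-- import re
--
-- def count_spencer_nfa_states(regex: str) -> int:
--     # One regex scan: each match is either an escape (backslash + any char) or one alphanumeric literal.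
--     return len(re.findall(r'\\.|[A-Za-z0-9]', regex, re.DOTALL)) + 1
-- ===== Notes on version B (the rewrite author's own statement) =====
-- stated objective: idiomatic
-- what changed: Replaced the manual index-based while loop with an explicit escaped-character skip by a single re.findall scan whose alternation matches an escape pair or one alphanumeric literal, counting the matches.
import Mathlib
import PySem

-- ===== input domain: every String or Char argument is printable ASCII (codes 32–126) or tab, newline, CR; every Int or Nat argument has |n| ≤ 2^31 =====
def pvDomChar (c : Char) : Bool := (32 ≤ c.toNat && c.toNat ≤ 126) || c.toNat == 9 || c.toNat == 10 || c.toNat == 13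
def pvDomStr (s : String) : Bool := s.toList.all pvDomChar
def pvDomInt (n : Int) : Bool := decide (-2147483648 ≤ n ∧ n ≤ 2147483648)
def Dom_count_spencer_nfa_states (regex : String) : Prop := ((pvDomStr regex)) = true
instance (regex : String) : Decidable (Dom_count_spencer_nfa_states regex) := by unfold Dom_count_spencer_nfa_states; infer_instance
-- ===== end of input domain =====

-- B replaces A's manual index loop (with an explicit skip for escapes) by a single
-- regex scan `re.findall(r'\\.|[A-Za-z0-9]', regex, re.DOTALL)`; objective: idiomatic.

-- ===== PORT A =====
-- A's `valid_chars` set literal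
def pvValidCharsA : PySem.Set Char :=
  PySem.Set.ofList "abcdefghijklmnopqrstuvwxyzABCDEFGHIJKLMNOPQRSTUVWXYZ0123456789".toList

-- A's while loop: state (i, position_count), index-based access with explicit skip
def pvALoop (cs : List Char) (i : Nat) (cnt : Int) : Int :=
  if h : i < cs.length then
    let c := cs[i]
    if pvValidCharsA.contains c then pvALoop cs (i + 1) (cnt + 1)
    else if c = '\\' ∧ i + 1 < cs.length then pvALoop cs (i + 2) (cnt + 1)
    else pvALoop cs (i + 1) cnt
  else cnt
termination_by cs.length - i

def count_spencer_nfa_states (regex : String) : Int :=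
  pvALoop regex.toList 0 0 + 1

-- ===== PORT B =====
-- the character class [A-Za-z0-9] of B's regex
def pvClassB : List Char :=
  "ABCDEFGHIJKLMNOPQRSTUVWXYZabcdefghijklmnopqrstuvwxyz0123456789".toList

-- B's findall scan: at each position, `\\.` (backslash + any char, DOTALL) matches and
-- consumes two chars, else one char of the class matches, else the engine advances one char;
-- a lone trailing backslash matches neither alternative.
def pvBScan : List Char → Int
  | [] => 0
  | [c] => if pvClassB.contains c then 1 else 0
  | c :: d :: rest =>
    if c = '\\' then 1 + pvBScan rest
    else (if pvClassB.contains c then 1 else 0) + pvBScan (d :: rest)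

def count_spencer_nfa_states_alt (regex : String) : Int :=
  pvBScan regex.toList + 1

-- ===== PRECONDITION & SPEC =====
def Spec_count_spencer_nfa_states (regex : String) (out : Int) : Prop := out = count_spencer_nfa_states_alt regex
instance (regex : String) (out : Int) : Decidable (Spec_count_spencer_nfa_states regex out) := by unfold Spec_count_spencer_nfa_states; infer_instance

-- ===== CLAIM (what is proved, stated in full; the proofs are below) =====
def Claim_equal_count_spencer_nfa_states : Prop := ∀ (regex : String), Dom_count_spencer_nfa_states regex → Spec_count_spencer_nfa_states regex (count_spencer_nfa_states regex)

-- ===== LEMMAS AND PROOFS =====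

-- A's set and B's character class hold the same characters
set_option maxRecDepth 4000 in
theorem pvValid_eq_class (c : Char) :
    pvValidCharsA.contains c = pvClassB.contains c := by
  have hperm : pvValidCharsA.Perm pvClassB := by decide
  simp [hperm.mem_iff]

theorem pvBackslash_not_class : pvClassB.contains '\\' = false := by decide

theorem pvALoop_eq_bScan :
    ∀ (n : Nat) (cs : List Char) (i : Nat) (cnt : Int), cs.length - i ≤ n →
      pvALoop cs i cnt = cnt + pvBScan (cs.drop i) := by
  intro n
  induction n with
  | zero =>
    intro cs i cnt hle
    have hge : cs.length ≤ i := by omega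
    rw [pvALoop]
    simp [Nat.not_lt.mpr hge, List.drop_of_length_le hge, pvBScan]
  | succ n ih =>
    intro cs i cnt hle
    rw [pvALoop]
    by_cases hi : i < cs.length
    · have hdrop : cs.drop i = cs[i] :: cs.drop (i + 1) := (List.getElem_cons_drop hi).symm
      simp only [hi, dite_true]
      by_cases hv : pvValidCharsA.contains cs[i]
      · have hcl : pvClassB.contains cs[i] = true := pvValid_eq_class _ ▸ hv
        have hne : cs[i] ≠ '\\' := by
          intro h; rw [h, pvBackslash_not_class] at hcl; simp at hcl
        rw [if_pos hv, ih cs (i + 1) (cnt + 1) (by omega), hdrop]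
        have hmem : cs[i] ∈ pvClassB := by simpa using hcl
        cases h2 : cs.drop (i + 1) with
        | nil => simp [pvBScan, hmem]
        | cons d rest => rw [pvBScan, if_neg hne, ← h2]; simp [hmem]; ring
      · rw [if_neg hv]
        by_cases hb : cs[i] = '\\' ∧ i + 1 < cs.length
        · obtain ⟨hbs, hlt⟩ := hb
          have hdrop1 : cs.drop (i + 1) = cs[i + 1] :: cs.drop (i + 2) :=
            (List.getElem_cons_drop hlt).symm
          rw [if_pos ⟨hbs, hlt⟩, ih cs (i + 2) (cnt + 1) (by omega), hdrop, hdrop1]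
          rw [pvBScan, if_pos hbs]
          ring
        · rw [if_neg hb, ih cs (i + 1) cnt (by omega), hdrop]
          have hcl : pvClassB.contains cs[i] = false := by
            rw [← pvValid_eq_class]; exact Bool.eq_false_iff.mpr hv
          have hmem : cs[i] ∉ pvClassB := by simpa using hcl
          by_cases hbs : cs[i] = '\\'
          · have hlen : ¬ i + 1 < cs.length := fun h => hb ⟨hbs, h⟩
            have h2 : cs.drop (i + 1) = [] := List.drop_of_length_le (by omega)
            rw [h2]
            simp [pvBScan, hmem]
          · cases h2 : cs.drop (i + 1) with
            | nil => simp [pvBScan, hmem]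
            | cons d rest => rw [pvBScan, if_neg hbs, ← h2]; simp [hmem]
    · have hge : cs.length ≤ i := by omega
      simp [hi, List.drop_of_length_le hge, pvBScan]

-- ===== VERDICT (by name: the statement is the Claim_ definition above) =====
theorem count_spencer_nfa_states_spec : Claim_equal_count_spencer_nfa_states := by
  intro regex _
  unfold Spec_count_spencer_nfa_states count_spencer_nfa_states count_spencer_nfa_states_alt
  rw [pvALoop_eq_bScan regex.toList.length regex.toList 0 0 (by omega)]
  simp
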